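-- pv_equiv track=rewrite | github.com/Kucaitang/EasyCrystal | EasyCrystal.py | find_min_indices
-- ===== SOURCE A (Python) =====
-- def find_min_indices(arr, n):
--     if n < 0:
--         raise ValueError("n must be a non-negative integer")
--     if n == 0:
--         return []
--     # 将数组元素与其索引组合成元组列表
--     indexed_elements = list(enumerate(arr))
--     # 根据元素值排序，若值相同则按索引排序
--     sorted_elements = sorted(indexed_elements, key=lambda x: (x[1], x[0]))
--     # 确定有效的n值，防止超出数组长度
--     valid_n = min(n, len(sorted_elements))
--     # 提取前n个元素的索引
--     result = [element[0] for element in sorted_elements[:valid_n]]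
--     return result
-- ===== SOURCE B (Python) =====
-- def find_min_indices(arr, n):
--     if n < 0:
--         raise ValueError("n must be a non-negative integer")
--     if n == 0:
--         return []
--     # One pass: keep a sorted list of the n smallest (value, index) pairs seen so far.
--     best = []
--     for i, v in enumerate(arr):
--         if len(best) < n or (v, i) < best[-1]:
--             j = 0
--             while j < len(best) and best[j] <= (v, i):
--                 j += 1
--             best.insert(j, (v, i))
--             if len(best) > n:
--                 best.pop()
--     return [i for _, i in best]
-- ===== Notes on version B (the rewrite author's own statement) =====
-- stated objective: alternative
-- what changed: Replaces enumerate + full sort + slice with a single left-to-right scan that maintains a bounded sorted list of the n smallest (value, index) pairs, inserting only when a candidate beats the current worst.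
import Mathlib
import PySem

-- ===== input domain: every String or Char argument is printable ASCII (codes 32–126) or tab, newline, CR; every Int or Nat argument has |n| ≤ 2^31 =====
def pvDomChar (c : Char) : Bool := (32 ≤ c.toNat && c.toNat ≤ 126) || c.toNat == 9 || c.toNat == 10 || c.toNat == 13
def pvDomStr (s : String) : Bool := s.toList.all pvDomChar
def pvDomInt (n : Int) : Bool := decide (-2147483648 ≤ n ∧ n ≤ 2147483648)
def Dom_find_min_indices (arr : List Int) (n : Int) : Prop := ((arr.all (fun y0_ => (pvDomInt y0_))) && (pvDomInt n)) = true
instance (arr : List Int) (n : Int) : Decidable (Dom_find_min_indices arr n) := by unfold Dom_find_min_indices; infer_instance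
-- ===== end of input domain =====

-- B replaces enumerate + full sort + slice by a single bounded-insertion scan keeping the n smallest (value, index) pairs; alternative decomposition, not claimed faster.


-- ===== PORT A =====
def find_min_indices (arr : List Int) (n : Int) : List Int :=
  -- 'if n < 0: raise ValueError' is excluded by Pre_find_min_indices
  if n == 0 then []
  else
    let indexed_elements := PySem.List.enumerate arr
    let sorted_elements := PySem.List.sorted2 indexed_elements (fun x => x.2) (fun x => x.1)
    let valid_n := min n (sorted_elements.length : Int)
    (PySem.List.slice sorted_elements none (some valid_n)).map (fun e => e.1)

-- ===== PORT B =====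
-- Python tuple '<' and '<=' on (Int, Int) pairs, lexicographic
def pairLt (a b : Int × Int) : Bool := decide (a.1 < b.1) || (decide (a.1 = b.1) && decide (a.2 < b.2))
def pairLe (a b : Int × Int) : Bool := decide (a.1 < b.1) || (decide (a.1 = b.1) && decide (a.2 ≤ b.2))

-- the 'j = 0; while j < len(best) and best[j] <= (v, i): j += 1; best.insert(j, (v, i))' loop
def insLe (q : Int × Int) : List (Int × Int) → List (Int × Int)
  | [] => [q]
  | y :: ys => if pairLe y q then y :: insLe q ys else q :: y :: ys

-- one iteration of B's for-loop; p = (i, v), q = (v, i); best[-1] is only read when best is nonempty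
def bstep (n : Int) (best : List (Int × Int)) (p : Int × Int) : List (Int × Int) :=
  let q := (p.2, p.1)
  if ((best.length : Int) < n || pairLt q (best.getLastD (0, 0))) then
    let b2 := insLe q best
    if n < (b2.length : Int) then b2.dropLast else b2
  else best

def find_min_indices_alt (arr : List Int) (n : Int) : List Int :=
  if n == 0 then []
  else ((PySem.List.enumerate arr).foldl (bstep n) []).map (fun e => e.2)

-- ===== PRECONDITION & SPEC =====
-- A raises ValueError exactly when n < 0 (B does too); Pre_ excludes those inputs.
def Pre_find_min_indices (arr : List Int) (n : Int) : Prop := 0 ≤ n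
instance (arr : List Int) (n : Int) : Decidable (Pre_find_min_indices arr n) := by unfold Pre_find_min_indices; infer_instance
def pvWitness_find_min_indices : List Int × Int := ([3, 1, 2], 2)

def Spec_find_min_indices (arr : List Int) (n : Int) (out : List Int) : Prop := out = find_min_indices_alt arr n
instance (arr : List Int) (n : Int) (out : List Int) : Decidable (Spec_find_min_indices arr n out) := by unfold Spec_find_min_indices; infer_instance

-- ===== CLAIM (what is proved, stated in full; the proofs are below) =====
def Claim_equal_find_min_indices : Prop := ∀ (arr : List Int) (n : Int), Dom_find_min_indices arr n → Pre_find_min_indices arr n → Spec_find_min_indices arr n (find_min_indices arr n)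

-- ===== LEMMAS AND PROOFS =====

-- swap (i, v) to (v, i): B's pairs are value-first
def pvSwap (p : Int × Int) : Int × Int := (p.2, p.1)

-- A's sorted2 comparator is pairLt on swapped pairs
theorem before_eq_pairLt (a b : Int × Int) :
    (decide ((fun x : Int × Int => x.2) a < (fun x : Int × Int => x.2) b) ||
      (!decide ((fun x : Int × Int => x.2) b < (fun x : Int × Int => x.2) a) &&
        decide ((fun x : Int × Int => x.1) a < (fun x : Int × Int => x.1) b)))
      = pairLt (pvSwap a) (pvSwap b) := by
  rcases a with ⟨a1, a2⟩; rcases b with ⟨b1, b2⟩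
  rw [Bool.eq_iff_iff]
  simp only [pairLt, pvSwap, Bool.or_eq_true, Bool.and_eq_true, Bool.not_eq_true',
    decide_eq_true_eq, decide_eq_false_iff_not]
  constructor <;> intro h <;> omega

theorem pairLt_asymm {a b : Int × Int} (h : pairLt a b = true) : pairLt b a = false := by
  rcases a with ⟨a1, a2⟩; rcases b with ⟨b1, b2⟩
  simp only [pairLt, Bool.or_eq_true, Bool.and_eq_true, decide_eq_true_eq] at h
  simp only [pairLt, Bool.or_eq_false_iff, Bool.and_eq_false_iff, decide_eq_false_iff_not]
  omega

-- ¬ b < a → ¬ c < b → ¬ c < a   (lexicographic "≤" is transitive)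
theorem pairLt_negtrans {a b c : Int × Int} (h1 : pairLt b a = false) (h2 : pairLt c b = false) :
    pairLt c a = false := by
  rcases a with ⟨a1, a2⟩; rcases b with ⟨b1, b2⟩; rcases c with ⟨c1, c2⟩
  simp only [pairLt, Bool.or_eq_false_iff, Bool.and_eq_false_iff, decide_eq_false_iff_not] at *
  omega

theorem pairLt_cross {x y z : Int × Int} (h1 : pairLt x y = true) (h2 : pairLt z y = false) :
    pairLt z x = false := by
  rcases x with ⟨x1, x2⟩; rcases y with ⟨y1, y2⟩; rcases z with ⟨z1, z2⟩
  simp only [pairLt, Bool.or_eq_true, Bool.and_eq_true, decide_eq_true_eq] at h1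
  simp only [pairLt, Bool.or_eq_false_iff, Bool.and_eq_false_iff, decide_eq_false_iff_not] at *
  omega

theorem pairLe_eq_not_lt (a b : Int × Int) : pairLe a b = !pairLt b a := by
  rcases a with ⟨a1, a2⟩; rcases b with ⟨b1, b2⟩
  rw [Bool.eq_iff_iff]
  simp only [pairLe, pairLt, Bool.or_eq_true, Bool.and_eq_true, Bool.not_eq_true',
    Bool.or_eq_false_iff, Bool.and_eq_false_iff, decide_eq_true_eq, decide_eq_false_iff_not]
  constructor <;> intro h <;> omega

-- B's insertion loop is insertBy pairLt
theorem insLe_eq_insertBy (q : Int × Int) (L : List (Int × Int)) :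
    insLe q L = PySem.List.insertBy pairLt q L := by
  induction L with
  | nil => rfl
  | cons y ys ih =>
    simp only [insLe, PySem.List.insertBy, pairLe_eq_not_lt, Bool.not_eq_eq_eq_not, Bool.not_true,
      ih]
    cases pairLt q y <;> simp

theorem length_insertBy (bf : Int × Int → Int × Int → Bool) (x : Int × Int)
    (L : List (Int × Int)) : (PySem.List.insertBy bf x L).length = L.length + 1 := by
  induction L with
  | nil => rfl
  | cons y ys ih =>
    simp only [PySem.List.insertBy]
    split <;> simp [ih]

theorem map_insertBy (f : Int × Int → Int × Int) (bf bf' : Int × Int → Int × Int → Bool)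
    (hb : ∀ a b, bf a b = bf' (f a) (f b)) (x : Int × Int) (L : List (Int × Int)) :
    (PySem.List.insertBy bf x L).map f = PySem.List.insertBy bf' (f x) (L.map f) := by
  induction L with
  | nil => rfl
  | cons y ys ih =>
    simp only [PySem.List.insertBy, List.map_cons, ← hb]
    split <;> simp [ih]

-- insertion sort (value-first pairs), as a foldl as in sorted2
def pvISort (s : List (Int × Int)) : List (Int × Int) :=
  s.foldl (fun acc x => PySem.List.insertBy pairLt x acc) []

theorem map_foldl_insertBy (f : Int × Int → Int × Int) (bf bf' : Int × Int → Int × Int → Bool)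
    (hb : ∀ a b, bf a b = bf' (f a) (f b)) (s acc : List (Int × Int)) :
    (s.foldl (fun a x => PySem.List.insertBy bf x a) acc).map f
      = (s.map f).foldl (fun a x => PySem.List.insertBy bf' x a) (acc.map f) := by
  induction s generalizing acc with
  | nil => rfl
  | cons y ys ih => simp only [List.foldl_cons, List.map_cons, ih, map_insertBy f bf bf' hb]

theorem length_pvISort (s : List (Int × Int)) : (pvISort s).length = s.length := by
  suffices h : ∀ acc : List (Int × Int),
      (s.foldl (fun a x => PySem.List.insertBy pairLt x a) acc).length = s.length + acc.length by
    simpa using h []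
  induction s with
  | nil => intro acc; simp
  | cons y ys ih =>
    intro acc
    simp only [List.foldl_cons, ih, length_insertBy, List.length_cons]
    omega

-- truncation commutes with insertion into a truncated list
theorem take_insertBy_take (bf : Int × Int → Int × Int → Bool) (q : Int × Int) :
    ∀ (L : List (Int × Int)) (N : Nat),
      (PySem.List.insertBy bf q (L.take N)).take N = (PySem.List.insertBy bf q L).take N := by
  intro L
  induction L with
  | nil => intro N; simp
  | cons y ys ih =>
    intro N
    match N with
    | 0 => simp
    | (m+1) =>
      rw [List.take_succ_cons]
      by_cases hb : bf q y = true
      · rw [show PySem.List.insertBy bf q (y :: List.take m ys) = q :: y :: List.take m ys from by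
            simp [PySem.List.insertBy, hb],
          show PySem.List.insertBy bf q (y :: ys) = q :: y :: ys from by
            simp [PySem.List.insertBy, hb]]
        match m with
        | 0 => simp
        | (k+1) =>
          simp only [List.take_succ_cons, List.take_take]
          rw [show min k (k+1) = k from by omega]
      · rw [show PySem.List.insertBy bf q (y :: List.take m ys)
              = y :: PySem.List.insertBy bf q (List.take m ys) from by
            simp [PySem.List.insertBy, hb],
          show PySem.List.insertBy bf q (y :: ys) = y :: PySem.List.insertBy bf q ys from by
            simp [PySem.List.insertBy, hb]]
        simp only [List.take_succ_cons]
        rw [ih m]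

theorem take_insertBy_of_ge (q : Int × Int) :
    ∀ (L : List (Int × Int)) (N : Nat), N ≤ L.length → (∀ y ∈ L.take N, pairLt q y = false) →
      (PySem.List.insertBy pairLt q L).take N = L.take N := by
  intro L
  induction L with
  | nil =>
    intro N hN _
    simp only [List.length_nil, Nat.le_zero] at hN
    simp [hN]
  | cons y ys ih =>
    intro N hN h
    match N with
    | 0 => simp
    | (m+1) =>
      have hy : pairLt q y = false := h y (by simp)
      rw [show PySem.List.insertBy pairLt q (y :: ys) = y :: PySem.List.insertBy pairLt q ys from by
        simp [PySem.List.insertBy, hy]]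
      simp only [List.take_succ_cons]
      rw [ih m (by simpa using hN)]
      intro z hz
      exact h z (by simp [hz])

-- sortedness invariant: no later element is strictly below an earlier one
def pvPw (L : List (Int × Int)) : Prop := L.Pairwise (fun a b => pairLt b a = false)

theorem pvPw_insertBy {L : List (Int × Int)} (x : Int × Int) (h : pvPw L) :
    pvPw (PySem.List.insertBy pairLt x L) := by
  induction L with
  | nil => simp [pvPw, PySem.List.insertBy]
  | cons y ys ih =>
    rcases List.pairwise_cons.mp h with ⟨hy, hys⟩
    simp only [PySem.List.insertBy]
    split
    · rename_i hlt
      refine List.pairwise_cons.mpr ⟨?_, h⟩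
      intro z hz
      rcases List.mem_cons.mp hz with rfl | hz
      · exact pairLt_asymm hlt
      · exact pairLt_cross hlt (hy z hz)
    · rename_i hnlt
      refine List.pairwise_cons.mpr ⟨?_, ih hys⟩
      intro z hz
      rcases (PySem.List.mem_insertBy _ _ _ _).mp hz with rfl | hz
      · simpa using hnlt
      · exact hy z hz

theorem pvPw_pvISort (s : List (Int × Int)) : pvPw (pvISort s) := by
  suffices h : ∀ acc : List (Int × Int), pvPw acc →
      pvPw (s.foldl (fun a x => PySem.List.insertBy pairLt x a) acc) by
    exact h [] (by simp [pvPw])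
  induction s with
  | nil => intro acc h; simpa using h
  | cons y ys ih => intro acc h; exact ih _ (pvPw_insertBy y h)

-- if q is not below the last element of a sorted nonempty list, it is not below any element
theorem not_lt_of_not_lt_last (q : Int × Int) :
    ∀ (L : List (Int × Int)) (d : Int × Int), pvPw L → L ≠ [] →
      pairLt q (L.getLastD d) = false → ∀ y ∈ L, pairLt q y = false := by
  intro L
  induction L with
  | nil => intro d _ h; exact absurd rfl h
  | cons y ys ih =>
    intro d hpw _ hlast z hz
    rcases List.pairwise_cons.mp hpw with ⟨hy, hys⟩
    cases ys with
    | nil =>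
      rcases List.mem_singleton.mp hz
      simpa using hlast
    | cons w ws =>
      have hlast' : pairLt q ((w :: ws).getLastD y) = false := by
        simpa [List.getLastD_cons] using hlast
      rcases List.mem_cons.mp hz with rfl | hz
      · rcases List.mem_cons.mp (List.getLastD_mem_cons (l := w :: ws) (a := z)) with heq | hmem
        · exact heq ▸ hlast'
        · exact pairLt_negtrans (hy _ hmem) hlast'
      · have hlast'' : pairLt q ((w :: ws).getLastD d) = false := by
          cases ws <;> simpa [List.getLastD_cons] using hlast'
        exact ih d hys (by simp) hlast'' z hz

-- bstep with the swap already applied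
def bstep2 (n : Int) (best : List (Int × Int)) (q : Int × Int) : List (Int × Int) :=
  if ((best.length : Int) < n || pairLt q (best.getLastD (0, 0))) then
    let b2 := insLe q best
    if n < (b2.length : Int) then b2.dropLast else b2
  else best

-- the main invariant: B's fold is the N-truncated insertion sort of the processed prefix
theorem bfold_eq_take (n : Int) (hn : 0 < n) :
    ∀ s : List (Int × Int), s.foldl (bstep2 n) [] = (pvISort s).take n.toNat := by
  intro s
  induction s using List.reverseRecOn with
  | nil => simp [pvISort]
  | append_singleton s q ih =>
    have hS : pvISort (s ++ [q]) = PySem.List.insertBy pairLt q (pvISort s) := by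
      simp [pvISort, List.foldl_append]
    rw [List.foldl_append, List.foldl_cons, List.foldl_nil, ih, hS]
    set N := n.toNat with hN
    have hnN : n = (N : Int) := by omega
    set acc := (pvISort s).take N with hacc
    have hlen : acc.length = min N s.length := by
      rw [hacc, List.length_take, length_pvISort]
    simp only [bstep2]
    by_cases hc : ((acc.length : Int) < n || pairLt q (acc.getLastD (0, 0))) = true
    · rw [if_pos hc]
      simp only [insLe_eq_insertBy]
      by_cases hfull : acc.length = N
      · have hlen2 : (PySem.List.insertBy pairLt q acc).length = N + 1 := by
          rw [length_insertBy, hfull]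
        rw [if_pos (by rw [hlen2]; omega)]
        rw [List.dropLast_eq_take, hlen2, Nat.add_sub_cancel, hacc, take_insertBy_take]
      · have hslt : (pvISort s).length < N := by
          rw [length_pvISort]; omega
        have hall : (pvISort s).take N = pvISort s := List.take_of_length_le (by omega)
        have hlen2 : (PySem.List.insertBy pairLt q acc).length = (pvISort s).length + 1 := by
          rw [hacc, hall, length_insertBy]
        rw [if_neg (by rw [hlen2]; omega), hacc, hall,
          List.take_of_length_le (by rw [length_insertBy]; omega)]
    · rw [if_neg hc]
      simp only [Bool.or_eq_true, not_or, Bool.not_eq_true] at hc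
      rcases hc with ⟨hge, hlast⟩
      simp only [decide_eq_false_iff_not, not_lt] at hge
      have hfull : acc.length = N := by omega
      have hNle : N ≤ (pvISort s).length := by rw [length_pvISort]; omega
      have hne : acc ≠ [] := by
        intro h; rw [h] at hfull; simp at hfull; omega
      have hpw : pvPw acc := (pvPw_pvISort s).sublist (List.take_sublist N _)
      have hforall := not_lt_of_not_lt_last q acc (0, 0) hpw hne hlast
      rw [hacc, take_insertBy_of_ge q (pvISort s) N hNle (fun y hy => hforall y (hacc ▸ hy))]

-- ===== VERDICT (by name: the statement is the Claim_ definition above) =====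
theorem find_min_indices_spec : Claim_equal_find_min_indices := by
  intro arr n _ hpre
  unfold Spec_find_min_indices find_min_indices find_min_indices_alt
  by_cases h0 : n == 0
  · rw [if_pos h0, if_pos h0]
  · rw [if_neg h0, if_neg h0]
    have hn : 0 < n := by
      simp only [beq_iff_eq] at h0
      exact lt_of_le_of_ne hpre (Ne.symm h0)
    set e := PySem.List.enumerate arr with he
    set S := PySem.List.sorted2 e (fun x : Int × Int => x.2) (fun x : Int × Int => x.1) with hSdef
    -- sorted2 with reverse=false is the insertBy fold with its lex comparator
    have hS : S = e.foldl (fun acc x => PySem.List.insertBy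
        (fun a b => decide ((fun x : Int × Int => x.2) a < (fun x : Int × Int => x.2) b) ||
          (!decide ((fun x : Int × Int => x.2) b < (fun x : Int × Int => x.2) a) &&
            decide ((fun x : Int × Int => x.1) a < (fun x : Int × Int => x.1) b))) x acc) [] := rfl
    have hswap : S.map pvSwap = pvISort (e.map pvSwap) := by
      rw [hS, map_foldl_insertBy pvSwap _ pairLt (fun a b => before_eq_pairLt a b) e []]
      rfl
    -- A's slice is a take of the sorted list
    have hvn : (0 : Int) ≤ min n (S.length : Int) := by
      have h1 : (0 : Int) ≤ (S.length : Int) := Int.natCast_nonneg _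
      omega
    show (PySem.List.slice S none (some (min n (S.length : Int)))).map (fun e => e.1)
      = (e.foldl (bstep n) []).map (fun e => e.2)
    rw [PySem.List.slice_to _ hvn]
    have htake : S.take (min n (S.length : Int)).toNat = S.take n.toNat := by
      have h2 : (min n (S.length : Int)).toNat = min n.toNat S.length := by omega
      rw [h2, ← List.take_take, List.take_length]
    rw [htake]
    -- B's fold is the truncated insertion sort of the swapped pairs
    have hBfold : e.foldl (bstep n) [] = (e.map pvSwap).foldl (bstep2 n) [] := by
      rw [List.foldl_map]
      rfl
    rw [hBfold, bfold_eq_take n hn (e.map pvSwap), ← hswap, ← List.map_take, List.map_map]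
    simp [Function.comp_def, pvSwap]
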